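-- pv_equiv track=rewrite | github.com/alea-institute/leeky | leeky/nlp.py | get_ws_token_boundaries
-- ===== SOURCE A (Python) =====
-- def get_ws_token_boundaries(text: str) -> list[int]:
--     """
--     This method returns the token splits for a given text based on very simple
--     non-consecutive whitespace tokenization.
--     """
--     if len(text) == 0:
--         return []
--
--     # get whitespace positions
--     whitespace_index = [i for i, c in enumerate(text) if c.isspace()]
--
--     # remove consecutive whitespace positions
--     whitespace_index = [
--         whitespace_index[i]
--         for i in range(len(whitespace_index))
--         if i == 0 or whitespace_index[i] != whitespace_index[i - 1] + 1
--     ]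
--
--     # return the whitespace positions with initial position
--     return [0] + whitespace_index + [len(text)]
-- ===== SOURCE B (Python) =====
-- def get_ws_token_boundaries(text: str) -> list[int]:
--     if len(text) == 0:
--         return []
--     boundaries = []
--     prev_ws = False
--     for i, c in enumerate(text):
--         is_ws = c.isspace()
--         if is_ws and not prev_ws:
--             boundaries.append(i)
--         prev_ws = is_ws
--     return [0] + boundaries + [len(text)]
-- ===== Notes on version B (the rewrite author's own statement) =====
-- stated objective: simpler
-- what changed: Replaces A's two-stage pipeline (collect all whitespace indices, then re-filter that index list by comparing neighbouring entries via range/indexing) with a single character-level scan keeping one previous-char flag that emits only the first index of each whitespace run (single pass, no intermediate full index list).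
import Mathlib
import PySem

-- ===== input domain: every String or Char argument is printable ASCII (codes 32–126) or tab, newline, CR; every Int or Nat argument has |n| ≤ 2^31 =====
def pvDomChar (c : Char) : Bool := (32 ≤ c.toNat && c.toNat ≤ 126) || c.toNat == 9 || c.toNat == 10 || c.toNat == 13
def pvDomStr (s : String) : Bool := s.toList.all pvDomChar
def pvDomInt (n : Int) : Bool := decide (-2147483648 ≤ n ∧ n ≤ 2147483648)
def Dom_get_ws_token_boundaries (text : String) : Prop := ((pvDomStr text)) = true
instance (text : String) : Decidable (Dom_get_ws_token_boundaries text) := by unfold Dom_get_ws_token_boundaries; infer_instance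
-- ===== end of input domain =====

-- B replaces A's collect-then-refilter index pipeline by one previous-char-flag scan (objective: simpler).

-- ===== PORT A =====
def get_ws_token_boundaries (text : String) : List Int :=
  if text.toList.length = 0 then []
  else
    -- whitespace_index = [i for i, c in enumerate(text) if c.isspace()]
    let ws : List Int :=
      ((PySem.List.enumerate text.toList).filter (fun ic => PySem.Chars.isspace ic.2)).map (·.1)
    -- whitespace_index = [ws[i] for i in range(len(ws)) if i == 0 or ws[i] != ws[i-1] + 1]
    -- (indices i and i-1 are in range here apart from i-1 at i = 0, which the guard short-circuits;
    --  pyGetD is exact on in-range nonnegative indices)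
    let ws2 : List Int :=
      ((PySem.List.pyRange 0 ws.length 1).filter
        (fun i => i == 0 || PySem.List.pyGetD ws i 0 != PySem.List.pyGetD ws (i - 1) 0 + 1)).map
        (fun i => PySem.List.pyGetD ws i 0)
    [0] ++ ws2 ++ [(text.toList.length : Int)]

-- ===== PORT B =====
def get_ws_token_boundaries_alt (text : String) : List Int :=
  if text.toList.length = 0 then []
  else
    let st :=
      (PySem.List.enumerate text.toList).foldl
        (fun (st : List Int × Bool) ic =>
          let is_ws := PySem.Chars.isspace ic.2
          ((if is_ws && !st.2 then st.1 ++ [ic.1] else st.1), is_ws))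
        ([], false)
    [0] ++ st.1 ++ [(text.toList.length : Int)]

-- ===== PRECONDITION & SPEC =====
def Spec_get_ws_token_boundaries (text : String) (out : List Int) : Prop := out = get_ws_token_boundaries_alt text
instance (text : String) (out : List Int) : Decidable (Spec_get_ws_token_boundaries text out) := by unfold Spec_get_ws_token_boundaries; infer_instance

-- ===== CLAIM (what is proved, stated in full; the proofs are below) =====
def Claim_equal_get_ws_token_boundaries : Prop := ∀ (text : String), Dom_get_ws_token_boundaries text → Spec_get_ws_token_boundaries text (get_ws_token_boundaries text)

-- ===== LEMMAS AND PROOFS =====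

-- reference: indices of whitespace chars, counting from s
def wsIdx (s : Int) : List Char → List Int
  | [] => []
  | c :: r => if PySem.Chars.isspace c then s :: wsIdx (s + 1) r else wsIdx (s + 1) r

-- reference: A's second stage, recursively (p = previously kept whitespace index)
def dedupGo (p : Int) : List Int → List Int
  | [] => []
  | b :: r => (if b == p + 1 then [] else [b]) ++ dedupGo b r

def dedupRec : List Int → List Int
  | [] => []
  | a :: r => a :: dedupGo a r

-- reference: B's run-start scan
def refB (s : Int) (prev : Bool) : List Char → List Int
  | [] => []
  | c :: r =>
    (if PySem.Chars.isspace c && !prev then [s] else []) ++ refB (s + 1) (PySem.Chars.isspace c) r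

theorem enumFilter (cs : List Char) (s : Int) :
    ((PySem.List.enumerate cs s).filter (fun ic => PySem.Chars.isspace ic.2)).map (·.1)
      = wsIdx s cs := by
  induction cs generalizing s with
  | nil => simp [PySem.List.enumerate_nil, wsIdx]
  | cons c r ih =>
    simp only [PySem.List.enumerate_cons, List.filter_cons, wsIdx]
    by_cases h : PySem.Chars.isspace c <;> simp [h, ih]

theorem goIdx (t : List Int) (p : Int) :
    ((List.range t.length).filter
        (fun k => t.getD k 0 != (p :: t).getD k 0 + 1)).map (fun k => t.getD k 0)
      = dedupGo p t := by
  induction t generalizing p with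
  | nil => simp [dedupGo]
  | cons b t ih =>
    simp only [List.length_cons, List.range_succ_eq_map, List.filter_cons, List.filter_map,
      Function.comp_def, Nat.succ_eq_add_one, List.getD_cons_succ,
      List.getD_cons_zero, dedupGo]
    by_cases h : b = p + 1
    · have hc : (b != p + 1) = false := by simp [h]
      have hb : (b == p + 1) = true := by simp [h]
      rw [hc, hb, if_neg (by simp), if_pos rfl]
      simpa using ih b
    · have hc : (b != p + 1) = true := by simp [h]
      have hb : (b == p + 1) = false := by simp [h]
      rw [hc, hb, if_pos rfl, if_neg (by simp)]
      simpa using ih b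

def natIdx (ws : List Int) : List Int :=
  ((List.range ws.length).filter
      (fun k => (k == 0) || ws.getD k 0 != ws.getD (k - 1) 0 + 1)).map (fun k => ws.getD k 0)

theorem natIdx_eq (ws : List Int) : natIdx ws = dedupRec ws := by
  cases ws with
  | nil => simp [natIdx, dedupRec]
  | cons a r =>
    unfold natIdx dedupRec
    rw [List.length_cons, List.range_succ_eq_map, List.filter_cons, if_pos (by simp),
      List.map_cons, List.filter_map, List.map_map]
    simp only [Function.comp_def, Nat.succ_eq_add_one, Nat.add_sub_cancel, List.getD_cons_succ,
      List.getD_cons_zero]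
    have htail :
        List.filter (fun x => (x + 1 == 0) || r.getD x 0 != (a :: r).getD x 0 + 1)
            (List.range r.length)
          = List.filter (fun k => r.getD k 0 != (a :: r).getD k 0 + 1) (List.range r.length) :=
      List.filter_congr (by intro k _; simp)
    rw [htail, goIdx]

theorem dedupIdx_eq (ws : List Int) :
    ((PySem.List.pyRange 0 ws.length 1).filter
        (fun i => i == 0 || PySem.List.pyGetD ws i 0 != PySem.List.pyGetD ws (i - 1) 0 + 1)).map
        (fun i => PySem.List.pyGetD ws i 0)
      = dedupRec ws := by
  rw [← natIdx_eq]
  rw [show ((ws.length : Int)) = ((ws.length : Nat) : Int) from rfl, PySem.List.pyRange_zero_nat,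
    List.filter_map, List.map_map]
  unfold natIdx
  simp only [Function.comp_def]
  have hfil : ∀ k ∈ List.range ws.length,
      (((k : Int) == 0) || PySem.List.pyGetD ws (k : Int) 0
          != PySem.List.pyGetD ws ((k : Int) - 1) 0 + 1)
        = ((k == 0) || ws.getD k 0 != ws.getD (k - 1) 0 + 1) := by
    intro k _
    cases k with
    | zero => simp
    | succ k' =>
      have h1 : (((k' + 1 : Nat) : Int)) - 1 = ((k' : Nat) : Int) := by push_cast; ring
      have h2 : PySem.List.pyGetD ws ((k' : Int) + 1) 0 = ws.getD (k' + 1) 0 := by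
        have h3 := PySem.List.pyGetD_natCast ws (k' + 1) 0
        push_cast at h3
        exact h3
      simp [h2, show ((k' : Int) + 1) ≠ 0 by omega]
  rw [List.filter_congr hfil]
  apply List.map_congr_left
  intro k _
  simp

-- dedupGo with last-kept index p < s matches the flag scan (flag ↔ p is the immediately preceding index)
theorem goRef (cs : List Char) (s p : Int) (h : p < s) :
    dedupGo p (wsIdx s cs) = refB s (p == s - 1) cs := by
  induction cs generalizing s p with
  | nil => simp [wsIdx, refB, dedupGo]
  | cons c r ih =>
    by_cases hc : PySem.Chars.isspace c
    · simp only [wsIdx, hc, refB, dedupGo, reduceIte]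
      have hrec : dedupGo s (wsIdx (s + 1) r) = refB (s + 1) true r := by
        have := ih (s + 1) s (by omega)
        simpa using this
      rw [hrec]
      by_cases hp : p = s - 1
      · have h1 : (s == p + 1) = true := by simp [hp]
        have h2 : (p == s - 1) = true := by simp [hp]
        rw [h1, h2]
        simp
      · have h1 : (s == p + 1) = false := by simp; omega
        have h2 : (p == s - 1) = false := by simp; omega
        rw [h1, h2]
        simp
    · simp only [wsIdx, hc, refB, Bool.false_and, Bool.false_eq_true, reduceIte]
      have hrec : dedupGo p (wsIdx (s + 1) r) = refB (s + 1) (p == s) r := by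
        have := ih (s + 1) p (by omega)
        simpa using this
      have hps : (p == s) = false := by simp; omega
      rw [hrec, hps]
      simp

theorem dedupRec_wsIdx (cs : List Char) (s : Int) :
    dedupRec (wsIdx s cs) = refB s false cs := by
  induction cs generalizing s with
  | nil => simp [wsIdx, refB, dedupRec]
  | cons c r ih =>
    by_cases hc : PySem.Chars.isspace c
    · simp only [wsIdx, hc, dedupRec, refB, reduceIte]
      have hgo : dedupGo s (wsIdx (s + 1) r) = refB (s + 1) true r := by
        have := goRef r (s + 1) s (by omega)
        simpa using this
      rw [hgo]
      simp
    · simp only [wsIdx, hc, dedupRec, refB, Bool.false_and, Bool.false_eq_true, reduceIte]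
      simpa using ih (s + 1)

theorem foldB (cs : List Char) (s : Int) (acc : List Int) (prev : Bool) :
    ((PySem.List.enumerate cs s).foldl
        (fun (st : List Int × Bool) ic =>
          let is_ws := PySem.Chars.isspace ic.2
          ((if is_ws && !st.2 then st.1 ++ [ic.1] else st.1), is_ws))
        (acc, prev)).1
      = acc ++ refB s prev cs := by
  induction cs generalizing s acc prev with
  | nil => simp [PySem.List.enumerate_nil, refB]
  | cons c r ih =>
    simp only [PySem.List.enumerate_cons, List.foldl_cons, refB]
    rw [ih]
    by_cases h : PySem.Chars.isspace c && !prev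
    · rw [if_pos h, if_pos h]
      simp
    · rw [if_neg h, if_neg h]
      simp

-- ===== VERDICT (by name: the statement is the Claim_ definition above) =====
theorem get_ws_token_boundaries_spec : Claim_equal_get_ws_token_boundaries := by
  intro text _
  unfold Spec_get_ws_token_boundaries get_ws_token_boundaries get_ws_token_boundaries_alt
  by_cases h : text.toList.length = 0
  · simp [h]
  · simp only [h, reduceIte]
    rw [enumFilter, dedupIdx_eq, dedupRec_wsIdx, foldB]
    simp
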